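-- pv_equiv track=rewrite | github.com/V-DeVito/PrimerDesigner | primerdesignr/mathews_hairpin.py | _find_all_hairpins
-- ===== SOURCE A (Python) =====
-- from typing import List, Tuple
--
-- _COMP = {'A': 'T', 'T': 'A', 'G': 'C', 'C': 'G'}
--
-- def _find_all_hairpins(seq: str, min_stem: int = 3, min_loop: int = 3,
--                        max_loop: int = 10) -> List[Tuple[List[Tuple[int, int]], int]]:
--     """
--     Scan sequence for all possible hairpin configurations.
--
--     Returns list of (stem_pairs, loop_size) tuples.
--     stem_pairs: [(i, j), ...] where i < j, ordered from closing pair outward.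
--     """
--     n = len(seq)
--     hairpins = []
--
--     for loop_start in range(min_stem, n - min_stem - min_loop + 1):
--         for loop_size in range(min_loop, min(max_loop + 1, n - loop_start - min_stem + 1)):
--             loop_end = loop_start + loop_size - 1
--
--             # Extend stem outward from loop
--             pairs = []
--             i = loop_start - 1
--             j = loop_end + 1
--
--             while i >= 0 and j < n:
--                 if _COMP.get(seq[i]) == seq[j]:
--                     pairs.append((i, j))
--                     i -= 1
--                     j += 1
--                 else:
--                     break
--
--             if len(pairs) >= min_stem:
--                 hairpins.append((pairs, loop_size))
--
--     return hairpins
-- ===== SOURCE B (Python) =====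
-- from typing import List, Tuple
--
-- _COMP = {'A': 'T', 'T': 'A', 'G': 'C', 'C': 'G'}
--
-- def _find_all_hairpins(seq: str, min_stem: int = 3, min_loop: int = 3,
--                        max_loop: int = 10) -> List[Tuple[List[Tuple[int, int]], int]]:
--     """Dynamic-programming variant: precompute, per diagonal, the length of the
--     complementary run starting at each closing pair, then read stems off the table."""
--     n = len(seq)
--     # ext[i][j] = length of the outward complementary run whose closing pair is (i, j)
--     prev = [0] * n
--     ext = []
--     for i in range(n):
--         row = [(1 + (prev[j + 1] if j + 1 < n else 0)) if _COMP.get(seq[i]) == seq[j] else 0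
--                for j in range(n)]
--         ext.append(row)
--         prev = row
--     hairpins = []
--     for loop_start in range(min_stem, n - min_stem - min_loop + 1):
--         for loop_size in range(min_loop, min(max_loop + 1, n - loop_start - min_stem + 1)):
--             i0 = loop_start - 1
--             j0 = loop_start + loop_size
--             stem = ext[i0][j0] if 0 <= i0 and j0 < n else 0
--             if stem >= min_stem:
--                 hairpins.append(([(i0 - k, j0 + k) for k in range(stem)], loop_size))
--     return hairpins
-- ===== Notes on version B (the rewrite author's own statement) =====
-- stated objective: alternative
-- what changed: Replaces A's per-configuration outward while-scan with a precomputed diagonal-extension DP table (row i from row i-1) read with one lookup per (loop_start, loop_size) configuration, the stem pairs then emitted by a closed-form index formula.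
-- outside the precondition, e.g. on _find_all_hairpins('AT', 1, -1, 5): A returns [([(0, 1)], 0)], B returns [([(0, 1)], 0)]
import Mathlib
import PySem

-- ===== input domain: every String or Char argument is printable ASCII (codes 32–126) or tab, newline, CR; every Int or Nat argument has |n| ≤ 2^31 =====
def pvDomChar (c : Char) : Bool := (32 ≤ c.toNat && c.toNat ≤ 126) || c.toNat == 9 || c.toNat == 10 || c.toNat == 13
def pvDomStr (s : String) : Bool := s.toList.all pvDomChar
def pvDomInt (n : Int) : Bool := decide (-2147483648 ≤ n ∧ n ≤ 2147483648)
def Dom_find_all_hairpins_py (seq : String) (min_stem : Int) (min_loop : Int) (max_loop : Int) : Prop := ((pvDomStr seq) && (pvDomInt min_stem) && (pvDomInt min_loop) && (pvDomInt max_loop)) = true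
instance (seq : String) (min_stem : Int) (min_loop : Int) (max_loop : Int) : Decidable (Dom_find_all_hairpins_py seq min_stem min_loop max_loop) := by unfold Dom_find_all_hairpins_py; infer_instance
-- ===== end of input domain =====

-- B replaces A's per-configuration outward while-scan by a precomputed diagonal-extension
-- DP table read off with one lookup per configuration (objective: alternative decomposition).

-- ===== PORT A =====
def pvComp : PySem.Dict Char Char :=
  PySem.Dict.ofList [('A', 'T'), ('T', 'A'), ('G', 'C'), ('C', 'G')]

-- the `while i >= 0 and j < n` outward-extension loop of A
def pvScanA (cs : List Char) (n : Int) (i j : Int) (pairs : List (Int × Int)) :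
    List (Int × Int) :=
  if _h : 0 ≤ i ∧ j < n then
    match PySem.List.pyGet? cs i, PySem.List.pyGet? cs j with
    | some ci, some cj =>
      if pvComp.get? ci = some cj then
        pvScanA cs n (i - 1) (j + 1) (pairs ++ [(i, j)])
      else pairs
    | _, _ => pairs   -- Python raises IndexError here; outside Pre_
  else pairs
termination_by (n - j).toNat
decreasing_by omega

def find_all_hairpins_py (seq : String) (min_stem : Int) (min_loop : Int) (max_loop : Int) : List ((List (Int × Int)) × Int) :=
  (PySem.List.pyRange min_stem ((seq.toList.length : Int) - min_stem - min_loop + 1) 1).foldl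
    (fun hairpins loop_start =>
      (PySem.List.pyRange min_loop
          (min (max_loop + 1) ((seq.toList.length : Int) - loop_start - min_stem + 1)) 1).foldl
        (fun hairpins loop_size =>
          -- loop_end = loop_start + loop_size - 1; pairs = the while-scan from the closing pair
          if min_stem ≤ ((pvScanA seq.toList (seq.toList.length : Int) (loop_start - 1)
              (loop_start + loop_size - 1 + 1) []).length : Int) then
            hairpins ++ [(pvScanA seq.toList (seq.toList.length : Int) (loop_start - 1)
              (loop_start + loop_size - 1 + 1) [], loop_size)]
          else hairpins)
        hairpins)
    []

-- ===== PORT B =====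
-- one row of the DP table: row i from row i-1 (`prev`), Source B's list comprehension
def pvRowB (cs : List Char) (n : Nat) (prev : List Int) (i : Nat) : List Int :=
  (List.range n).map (fun j =>
    if pvComp.get? (cs.getD i ' ') = some (cs.getD j ' ') then
      1 + (if j + 1 < n then prev.getD (j + 1) 0 else 0)
    else 0)

-- Source B's `for i in range(n)` loop building the table (state: rows so far, previous row)
def pvTableB (cs : List Char) (n : Nat) : List (List Int) :=
  ((List.range n).foldl
    (fun (st : List (List Int) × List Int) i =>
      let row := pvRowB cs n st.2 i
      (st.1 ++ [row], row))
    ([], List.replicate n 0)).1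

-- the guarded table lookup `ext[i0][j0] if 0 <= i0 and j0 < n else 0` of Source B
def pvStemB (seq : String) (i0 : Int) (j0 : Int) : Int :=
  if 0 ≤ i0 ∧ j0 < (seq.toList.length : Int) then
    (((pvTableB seq.toList seq.toList.length).getD i0.toNat []).getD j0.toNat 0)
  else 0

def find_all_hairpins_py_alt (seq : String) (min_stem : Int) (min_loop : Int) (max_loop : Int) : List ((List (Int × Int)) × Int) :=
  (PySem.List.pyRange min_stem ((seq.toList.length : Int) - min_stem - min_loop + 1) 1).foldl
    (fun hairpins loop_start =>
      (PySem.List.pyRange min_loop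
          (min (max_loop + 1) ((seq.toList.length : Int) - loop_start - min_stem + 1)) 1).foldl
        (fun hairpins loop_size =>
          -- i0 = loop_start - 1, j0 = loop_start + loop_size; stem = one table lookup
          if min_stem ≤ pvStemB seq (loop_start - 1) (loop_start + loop_size) then
            hairpins ++ [((List.range (pvStemB seq (loop_start - 1) (loop_start + loop_size)).toNat).map
              (fun (k : Nat) => (loop_start - 1 - (k : Int), loop_start + loop_size + (k : Int))), loop_size)]
          else hairpins)
        hairpins)
    []

-- ===== PRECONDITION & SPEC =====
-- Pre_ restricts to the natural domain min_loop ≥ 0 (a loop of negative length is malformed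
-- input), except that it keeps the negative-min_loop inputs on which the loop ranges are
-- trivially empty; on the remaining excluded inputs A can raise IndexError or silently compare
-- characters through Python's negative-index wraparound, depending on the interplay of all four
-- parameters, which is no sensible specification.
def Pre_find_all_hairpins_py (seq : String) (min_stem : Int) (min_loop : Int) (max_loop : Int) : Prop :=
  0 ≤ min_loop
  ∨ (seq.toList.length : Int) - min_stem - min_loop + 1 ≤ min_stem
  ∨ max_loop < min_loop
instance (seq : String) (min_stem : Int) (min_loop : Int) (max_loop : Int) : Decidable (Pre_find_all_hairpins_py seq min_stem min_loop max_loop) := by unfold Pre_find_all_hairpins_py; infer_instance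

def pvWitness_find_all_hairpins_py : String × Int × Int × Int := ("GGGAAACCC", 3, 3, 10)

def Spec_find_all_hairpins_py (seq : String) (min_stem : Int) (min_loop : Int) (max_loop : Int) (out : List ((List (Int × Int)) × Int)) : Prop := out = find_all_hairpins_py_alt seq min_stem min_loop max_loop
instance (seq : String) (min_stem : Int) (min_loop : Int) (max_loop : Int) (out : List ((List (Int × Int)) × Int)) : Decidable (Spec_find_all_hairpins_py seq min_stem min_loop max_loop out) := by unfold Spec_find_all_hairpins_py; infer_instance

-- ===== CLAIM (what is proved, stated in full; the proofs are below) =====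
def Claim_equal_find_all_hairpins_py : Prop := ∀ (seq : String) (min_stem : Int) (min_loop : Int) (max_loop : Int), Dom_find_all_hairpins_py seq min_stem min_loop max_loop → Pre_find_all_hairpins_py seq min_stem min_loop max_loop → Spec_find_all_hairpins_py seq min_stem min_loop max_loop (find_all_hairpins_py seq min_stem min_loop max_loop)

-- ===== LEMMAS AND PROOFS =====

-- reference extension length: the value both the scan and the table compute
def pvExtF (cs : List Char) (n : Int) (i j : Int) : Nat :=
  if h : 0 ≤ i ∧ j < n ∧ 0 ≤ j ∧ i < n then
    if pvComp.get? (cs.getD i.toNat ' ') = some (cs.getD j.toNat ' ') then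
      1 + pvExtF cs n (i - 1) (j + 1)
    else 0
  else 0
termination_by (n - j).toNat
decreasing_by omega

lemma pvScanA_eq_aux (cs : List Char) (fuel : Nat) :
    ∀ (i j : Int), ((cs.length : Int) - j).toNat ≤ fuel → i < j →
      ∀ (pairs : List (Int × Int)),
      pvScanA cs (cs.length : Int) i j pairs =
        pairs ++ (List.range (pvExtF cs (cs.length : Int) i j)).map
          (fun (k : Nat) => (i - (k : Int), j + (k : Int))) := by
  induction fuel with
  | zero =>
    intro i j hf hij pairs
    have hg : ¬ (0 ≤ i ∧ j < (cs.length : Int)) := by omega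
    rw [pvScanA, pvExtF, dif_neg hg, dif_neg (by omega)]
    simp
  | succ m ih =>
    intro i j hf hij pairs
    rw [pvScanA, pvExtF]
    by_cases hg : 0 ≤ i ∧ j < (cs.length : Int)
    · have hg' : 0 ≤ i ∧ j < (cs.length : Int) ∧ 0 ≤ j ∧ i < (cs.length : Int) := by
        omega
      have hi : i.toNat < cs.length := by omega
      have hjn : j.toNat < cs.length := by omega
      have hgi : PySem.List.pyGet? cs i = some (cs.getD i.toNat ' ') := by
        rw [PySem.List.pyGet?_eq_some_getElem cs (by omega) (by exact_mod_cast hg'.2.2.2),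
          List.getD_eq_getElem cs ' ' hi]
      have hgj : PySem.List.pyGet? cs j = some (cs.getD j.toNat ' ') := by
        rw [PySem.List.pyGet?_eq_some_getElem cs (by omega) hg.2,
          List.getD_eq_getElem cs ' ' hjn]
      rw [dif_pos hg, dif_pos hg', hgi, hgj]
      dsimp only
      by_cases hc : pvComp.get? (cs.getD i.toNat ' ') = some (cs.getD j.toNat ' ')
      · rw [if_pos hc, if_pos hc,
          ih (i - 1) (j + 1) (by omega) (by omega) (pairs ++ [(i, j)])]
        rw [Nat.add_comm 1, List.range_succ_eq_map]
        simp only [List.map_cons, List.map_map, List.append_assoc, List.singleton_append,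
          Nat.cast_zero, sub_zero, add_zero]
        congr 2
        apply List.map_congr_left
        intro k _
        simp only [Function.comp_apply, Nat.succ_eq_add_one, Prod.mk.injEq, Nat.cast_add,
          Nat.cast_one]
        omega
      · rw [if_neg hc, if_neg hc]
        simp
    · rw [dif_neg hg, dif_neg (by omega)]
      simp

lemma pvScanA_eq (cs : List Char) (i j : Int) (pairs : List (Int × Int)) (hij : i < j) :
    pvScanA cs (cs.length : Int) i j pairs =
      pairs ++ (List.range (pvExtF cs (cs.length : Int) i j)).map
        (fun (k : Nat) => (i - (k : Int), j + (k : Int))) :=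
  pvScanA_eq_aux cs ((cs.length : Int) - j).toNat i j le_rfl hij pairs

-- the i-th loop iteration state of pvTableB
def pvRowsAux (cs : List Char) (n : Nat) : Nat → List (List Int) × List Int
  | 0 => ([], List.replicate n 0)
  | m + 1 =>
    let st := pvRowsAux cs n m
    let row := pvRowB cs n st.2 m
    (st.1 ++ [row], row)

lemma pvFoldl_eq_rowsAux (cs : List Char) (n : Nat) : ∀ (m : Nat),
    (List.range m).foldl
      (fun (st : List (List Int) × List Int) i =>
        (st.1 ++ [pvRowB cs n st.2 i], pvRowB cs n st.2 i))
      ([], List.replicate n 0) = pvRowsAux cs n m := by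
  intro m
  induction m with
  | zero => rfl
  | succ k ih =>
    rw [List.range_succ, List.foldl_append, ih]
    rfl

lemma pvTableB_eq_rowsAux (cs : List Char) (n : Nat) :
    pvTableB cs n = (pvRowsAux cs n n).1 := by
  rw [pvTableB, pvFoldl_eq_rowsAux]

lemma pvRowsAux_snd_getD (cs : List Char) (m j : Nat) (hm : m ≤ cs.length)
    (hj : j < cs.length) :
    ((pvRowsAux cs cs.length m).2).getD j 0 =
      (pvExtF cs (cs.length : Int) ((m : Int) - 1) (j : Int) : Int) := by
  induction m generalizing j with
  | zero =>
    rw [pvExtF, dif_neg (by omega)]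
    simp [pvRowsAux]
  | succ k ih =>
    have hk : k < cs.length := by omega
    show (pvRowB cs cs.length (pvRowsAux cs cs.length k).2 k).getD j 0 = _
    have hk1 : ((k + 1 : Nat) : Int) - 1 = (k : Int) := by push_cast; ring
    rw [hk1]
    rw [pvRowB, List.getD_eq_getElem _ _ (by simpa using hj), List.getElem_map,
      List.getElem_range]
    rw [pvExtF, dif_pos (by omega)]
    simp only [Int.toNat_natCast]
    by_cases hc : pvComp.get? (cs.getD k ' ') = some (cs.getD j ' ')
    · rw [if_pos hc, if_pos hc]
      by_cases hjn : j + 1 < cs.length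
      · rw [if_pos hjn, ih (j + 1) (by omega) hjn]
        have hjj : ((j : Int)) + 1 = ((j + 1 : Nat) : Int) := by push_cast; ring
        rw [hjj]
        push_cast
        ring
      · rw [if_neg hjn, pvExtF, dif_neg (by omega)]
        simp
    · rw [if_neg hc, if_neg hc]
      simp

lemma pvRowsAux_fst_length (cs : List Char) (n : Nat) : ∀ (m : Nat),
    (pvRowsAux cs n m).1.length = m := by
  intro m
  induction m with
  | zero => rfl
  | succ k ih => simp [pvRowsAux, ih]

lemma pvRowsAux_fst_getD (cs : List Char) (n : Nat) : ∀ (m i : Nat), i < m →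
    (pvRowsAux cs n m).1.getD i [] = (pvRowsAux cs n (i + 1)).2 := by
  intro m
  induction m with
  | zero => omega
  | succ k ih =>
    intro i hi
    show ((pvRowsAux cs n k).1 ++ [pvRowB cs n (pvRowsAux cs n k).2 k]).getD i [] = _
    by_cases hik : i < k
    · rw [List.getD_append _ _ _ i (by rw [pvRowsAux_fst_length]; omega), ih i hik]
    · have hik' : i = k := by omega
      subst hik'
      rw [List.getD_append_right _ _ _ i (by rw [pvRowsAux_fst_length]), pvRowsAux_fst_length]
      simp
      rfl

lemma pvTable_lookup (cs : List Char) (i j : Nat) (hi : i < cs.length) (hj : j < cs.length) :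
    ((pvTableB cs cs.length).getD i []).getD j 0 =
      (pvExtF cs (cs.length : Int) (i : Int) (j : Int) : Int) := by
  rw [pvTableB_eq_rowsAux, pvRowsAux_fst_getD cs cs.length cs.length i hi,
    pvRowsAux_snd_getD cs (i + 1) j (by omega) hj]
  congr 2
  push_cast
  ring

-- ===== VERDICT (by name: the statement is the Claim_ definition above) =====
theorem find_all_hairpins_py_spec : Claim_equal_find_all_hairpins_py := by
  intro seq ms ml Ml _ hpre
  unfold Spec_find_all_hairpins_py find_all_hairpins_py find_all_hairpins_py_alt
  by_cases hml : 0 ≤ ml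
  · apply PySem.List.foldl_congr_mem
    intro acc ls hls
    apply PySem.List.foldl_congr_mem
    intro acc2 lsz hlsz
    rw [PySem.List.mem_pyRange_one] at hls hlsz
    have hlsz0 : 0 ≤ lsz := le_trans hml hlsz.1
    have hj0 : ls + lsz - 1 + 1 = ls + lsz := by ring
    rw [hj0, pvScanA_eq seq.toList (ls - 1) (ls + lsz) [] (by omega), pvStemB]
    by_cases hg : 0 ≤ ls - 1 ∧ ls + lsz < (seq.toList.length : Int)
    · have hi : (ls - 1).toNat < seq.toList.length := by omega
      have hjn : (ls + lsz).toNat < seq.toList.length := by omega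
      rw [if_pos hg, pvTable_lookup seq.toList (ls - 1).toNat (ls + lsz).toNat hi hjn]
      have hci : (((ls - 1).toNat : Int)) = ls - 1 := by omega
      have hcj : (((ls + lsz).toNat : Int)) = ls + lsz := by omega
      rw [hci, hcj]
      simp only [List.nil_append, List.length_map, List.length_range, Int.toNat_natCast]
    · rw [if_neg hg, pvExtF, dif_neg (by omega)]
      simp
  · rcases hpre with h | h | h
    · omega
    · rw [PySem.List.pyRange_one_eq_nil h]
      rfl
    · apply PySem.List.foldl_congr_mem
      intro acc ls _
      have hnil : PySem.List.pyRange ml (min (Ml + 1) ((seq.toList.length : Int) - ls - ms + 1)) = ([] : List Int) :=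
        PySem.List.pyRange_one_eq_nil (le_trans (min_le_left _ _) (by omega))
      rw [hnil]
      rfl
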